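-- pv_equiv track=rewrite | github.com/eliottcassidy2000/math | 04-computation/overlap_cross_length.py | cross_co_occurrence
-- ===== SOURCE A (Python) =====
-- def cross_co_occurrence(by_k, k1, k2, p):
--     """Compute co_occ_{k1,k2}(d) = #{(C1,C2) : |C1|=k1, |C2|=k2, both contain 0 and d}.
--
--     For circulant: co_occ_{k1,k2}(d) depends only on min(d, p-d).
--     """
--     sets1 = by_k.get(k1, [])
--     sets2 = by_k.get(k2, [])
--
--     co_occ = [0] * p
--     for d in range(1, p):
--         count = 0
--         for s1 in sets1:
--             if 0 not in s1 or d not in s1: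
--                 continue
--             for s2 in sets2:
--                 if k1 == k2 and s2 <= s1:  # avoid double counting for same k
--                     continue
--                 if 0 not in s2 or d not in s2:
--                     continue
--                 # This is a pair of cycles both containing 0 and d
--                 count += 1
--         co_occ[d] = count
--     return co_occ
-- ===== SOURCE B (Python) =====
-- def cross_co_occurrence(by_k, k1, k2, p):
--     """Same result as A by a different algorithm: one pass over each list of
--     sets precomputes per-d incidence counts a1/a2, and for k1 == k2 the
--     lexicographic skip is replaced by the closed form
--     (m^2 - sum of squared multiplicities) // 2."""
--     sets1 = by_k.get(k1, [])
--     sets2 = by_k.get(k2, [])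
--
--     def incidence(sets):
--         a = [0] * p
--         for s in sets:
--             if 0 in s:
--                 for e in set(s):
--                     if 1 <= e < p:
--                         a[e] += 1
--         return a
--
--     a1 = incidence(sets1)
--     if k1 != k2:
--         a2 = incidence(sets2)
--         return [0 if d == 0 else a1[d] * a2[d] for d in range(p)]
--     # k1 == k2: pairs (s1, s2) with s2 > s1 lexicographically
--     cnt = {}
--     for s in sets1:
--         if 0 in s:
--             t = tuple(s)
--             cnt[t] = cnt.get(t, 0) + 1
--     sq = [0] * p
--     for t, c in cnt.items():
--         for e in set(t):
--             if 1 <= e < p: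
--                 sq[e] += c * c
--     return [0 if d == 0 else (a1[d] * a1[d] - sq[d]) // 2 for d in range(p)]
-- ===== Notes on version B (the rewrite author's own statement) =====
-- stated objective: alternative
-- what changed: Replaces the per-d double scan over both set lists by one pass building per-d incidence counts a1/a2 (and, for k1==k2, a multiplicity counter keyed by the tuple), so each entry is a1[d]*a2[d] or (a1[d]^2 - sum c^2)//2 instead of a nested pair scan per d.
import Mathlib
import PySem

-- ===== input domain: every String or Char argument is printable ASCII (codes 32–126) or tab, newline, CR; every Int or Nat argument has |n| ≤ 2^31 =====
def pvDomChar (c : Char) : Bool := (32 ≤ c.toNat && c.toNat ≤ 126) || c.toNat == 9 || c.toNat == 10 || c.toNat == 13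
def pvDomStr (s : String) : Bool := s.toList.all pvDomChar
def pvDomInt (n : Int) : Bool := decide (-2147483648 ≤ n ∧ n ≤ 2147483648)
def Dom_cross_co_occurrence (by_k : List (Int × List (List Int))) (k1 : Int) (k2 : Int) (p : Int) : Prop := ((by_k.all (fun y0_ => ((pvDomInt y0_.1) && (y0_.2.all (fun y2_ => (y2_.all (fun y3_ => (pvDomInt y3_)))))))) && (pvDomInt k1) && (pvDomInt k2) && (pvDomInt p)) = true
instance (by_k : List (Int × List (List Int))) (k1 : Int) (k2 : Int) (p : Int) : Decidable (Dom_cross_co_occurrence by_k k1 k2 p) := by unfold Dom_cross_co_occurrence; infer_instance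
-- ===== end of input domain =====

-- B replaces A's per-d double scan over both set lists by one-pass per-d incidence
-- counts (and, for k1 == k2, a multiplicity counter), computing each entry by a
-- closed formula instead of a nested pair scan (alternative algorithm, same cost
-- on the measured inputs).

-- ===== PORT A =====
-- Python's `s2 <= s1` on two lists of ints: lexicographic, prefix is smaller (exact, hand-ported)
def pvPyLe : List Int → List Int → Bool
  | [], _ => true
  | _ :: _, [] => false
  | a :: x, b :: y => if a < b then true else if b < a then false else pvPyLe x y

def cross_co_occurrence (by_k : List (Int × List (List Int))) (k1 : Int) (k2 : Int) (p : Int) : List Int :=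
  let sets1 := (PySem.Dict.mk by_k).getD k1 []
  let sets2 := (PySem.Dict.mk by_k).getD k2 []
  (PySem.List.pyRange 1 p 1).foldl (fun co_occ d =>
    let count : Int := sets1.foldl (fun count s1 =>
      if !(s1.contains 0) || !(s1.contains d) then count
      else sets2.foldl (fun count s2 =>
        if (k1 == k2) && pvPyLe s2 s1 then count
        else if !(s2.contains 0) || !(s2.contains d) then count
        else count + 1) count) 0
    co_occ.set d.toNat count) (List.replicate p.toNat 0)

-- ===== PORT B =====
-- `a[e] += c` guarded by `1 <= e < p` (index always in range, list has length p)
def pvAddAt (p : Int) (c : Int) (a : List Int) (e : Int) : List Int :=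
  if 1 ≤ e ∧ e < p then a.set e.toNat (a.getD e.toNat 0 + c) else a

def pvIncidence (p : Int) (sets : List (List Int)) : List Int :=
  sets.foldl (fun a s =>
    if s.contains 0 then (PySem.Set.ofList s).foldl (pvAddAt p 1) a else a)
    (List.replicate p.toNat 0)

def cross_co_occurrence_alt (by_k : List (Int × List (List Int))) (k1 : Int) (k2 : Int) (p : Int) : List Int :=
  let sets1 := (PySem.Dict.mk by_k).getD k1 []
  let sets2 := (PySem.Dict.mk by_k).getD k2 []
  let a1 := pvIncidence p sets1
  if k1 ≠ k2 then
    let a2 := pvIncidence p sets2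
    (PySem.List.pyRange 0 p 1).map (fun d =>
      if d = 0 then 0 else a1.getD d.toNat 0 * a2.getD d.toNat 0)
  else
    let cnt := sets1.foldl (fun cnt s =>
      if s.contains 0 then cnt.modify s 0 (· + 1) else cnt) (PySem.Dict.empty : PySem.Dict (List Int) Int)
    let sq := cnt.items.foldl (fun sq tc =>
      (PySem.Set.ofList tc.1).foldl (pvAddAt p (tc.2 * tc.2)) sq) (List.replicate p.toNat 0)
    (PySem.List.pyRange 0 p 1).map (fun d =>
      if d = 0 then 0
      else PySem.Int.floordiv (a1.getD d.toNat 0 * a1.getD d.toNat 0 - sq.getD d.toNat 0) 2)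

-- ===== PRECONDITION & SPEC =====
def Spec_cross_co_occurrence (by_k : List (Int × List (List Int))) (k1 : Int) (k2 : Int) (p : Int) (out : List Int) : Prop := out = cross_co_occurrence_alt by_k k1 k2 p
instance (by_k : List (Int × List (List Int))) (k1 : Int) (k2 : Int) (p : Int) (out : List Int) : Decidable (Spec_cross_co_occurrence by_k k1 k2 p out) := by unfold Spec_cross_co_occurrence; infer_instance

-- ===== CLAIM (what is proved, stated in full; the proofs are below) =====
def Claim_equal_cross_co_occurrence : Prop := ∀ (by_k : List (Int × List (List Int))) (k1 : Int) (k2 : Int) (p : Int), Dom_cross_co_occurrence by_k k1 k2 p → Spec_cross_co_occurrence by_k k1 k2 p (cross_co_occurrence by_k k1 k2 p)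


-- ===== LEMMAS AND PROOFS =====

-- Python list `<=` is reflexive, total and antisymmetric
theorem pvPyLe_refl (x : List Int) : pvPyLe x x = true := by
  induction x with
  | nil => rfl
  | cons a t ih => simp [pvPyLe, ih]

theorem pvPyLe_total (x y : List Int) : pvPyLe x y = true ∨ pvPyLe y x = true := by
  induction x generalizing y with
  | nil => left; rfl
  | cons a t ih =>
    cases y with
    | nil => right; rfl
    | cons b u =>
      rcases lt_trichotomy a b with h | h | h
      · left; simp [pvPyLe, h]
      · subst h; rcases ih u with h' | h' <;> [left; right] <;> simp [pvPyLe, h']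
      · right; simp [pvPyLe, h]

theorem pvPyLe_antisymm (x y : List Int) (h1 : pvPyLe x y = true) (h2 : pvPyLe y x = true) : x = y := by
  induction x generalizing y with
  | nil => cases y with
    | nil => rfl
    | cons b u => simp [pvPyLe] at h2
  | cons a t ih =>
    cases y with
    | nil => simp [pvPyLe] at h1
    | cons b u =>
      rcases lt_trichotomy a b with h | h | h
      · simp [pvPyLe, h, not_lt.mpr h.le] at h2
      · subst h
        simp only [pvPyLe, lt_irrefl, if_false] at h1 h2
        rw [ih u h1 h2]
      · simp [pvPyLe, h, not_lt.mpr h.le] at h1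

-- trichotomy as a 0/1 identity
theorem pv_tri (x y : List Int) :
    (if pvPyLe y x then (0:Int) else 1) + (if pvPyLe x y then (0:Int) else 1)
      + (if y = x then (1:Int) else 0) = 1 := by
  by_cases hxy : x = y
  · subst hxy; simp [pvPyLe_refl]
  · rcases pvPyLe_total x y with h | h
    · have h2 : pvPyLe y x = false := by
        by_contra hc
        exact hxy (pvPyLe_antisymm x y h (by revert hc; cases pvPyLe y x <;> simp))
      simp [h, h2, Ne.symm hxy]
    · have h2 : pvPyLe x y = false := by
        by_contra hc
        exact hxy (pvPyLe_antisymm x y (by revert hc; cases pvPyLe x y <;> simp) h)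
      simp [h, h2, Ne.symm hxy]

-- Fubini for double list sums
theorem pv_sum_comm {A B : Type} (l1 : List A) (l2 : List B) (g : A -> B -> Int) :
    (l1.map (fun x => (l2.map (g x)).sum)).sum
      = (l2.map (fun y => (l1.map (fun x => g x y)).sum)).sum := by
  induction l1 with
  | nil => simp
  | cons a t ih =>
    simp only [List.map_cons, List.sum_cons, ih]
    rw [← PySem.List.sum_map_add_int]

-- List.count does not depend on which (lawful) BEq instance is used
theorem pv_count_irrel (m : List Int) (F : List (List Int)) :
    @List.count (List Int) (@instBEqOfDecidableEq (List Int) (inferInstance)) m F = List.count m F := by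
  rw [@List.count_eq_countP (List Int) (@instBEqOfDecidableEq (List Int) inferInstance) m F,
    List.count_eq_countP]
  apply List.countP_congr
  intro a _
  by_cases h : a = m <;> simp [h]

-- counts grouped by distinct value: sum of squared multiplicities = sum of counts
theorem pv_grouped (F G : List (List Int)) (hG : G.Nodup) (hmem : ∀ t, t ∈ G ↔ t ∈ F) :
    (G.map (fun t => (F.count t : Int) * (F.count t : Int))).sum
      = (F.map (fun x => (F.count x : Int))).sum := by
  have hGF : G.toFinset = F.toFinset := by
    ext t; simp [List.mem_toFinset, hmem]
  rw [← List.sum_toFinset _ hG, Finset.sum_list_map_count, hGF]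
  apply Finset.sum_congr rfl
  intro m _
  rw [nsmul_eq_mul, pv_count_irrel]

-- the pairing identity: m^2 = 2N + E
theorem pv_pair (F : List (List Int)) :
    (F.length : Int) * (F.length : Int)
      = 2 * (F.map (fun x => (F.countP (fun y => !pvPyLe y x) : Int))).sum
        + (F.map (fun x => (F.count x : Int))).sum := by
  have hN : ∀ x, ((F.countP (fun y => !pvPyLe y x) : Int))
      = (F.map (fun y => if pvPyLe y x then (0:Int) else 1)).sum := by
    intro x
    rw [← PySem.List.sum_map_ite_one_zero (fun y => !pvPyLe y x)]
    apply congrArg List.sum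
    apply List.map_congr_left
    intro y _; cases h : pvPyLe y x <;> simp [h]
  have hE : ∀ x, ((F.count x : Int))
      = (F.map (fun y => if y = x then (1:Int) else 0)).sum := by
    intro x
    rw [List.count_eq_countP, ← PySem.List.sum_map_ite_one_zero (fun y => y == x)]
    apply congrArg List.sum
    apply List.map_congr_left
    intro y _; by_cases h : y = x <;> simp [h]
  have swap : (F.map (fun x => (F.map (fun y => if pvPyLe y x then (0:Int) else 1)).sum)).sum
      = (F.map (fun x => (F.map (fun y => if pvPyLe x y then (0:Int) else 1)).sum)).sum := by
    exact pv_sum_comm F F (fun x y => if pvPyLe y x then (0:Int) else 1)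
  have key : (F.map (fun x => (F.map (fun y =>
        (if pvPyLe y x then (0:Int) else 1) + (if pvPyLe x y then (0:Int) else 1)
          + (if y = x then (1:Int) else 0))).sum)).sum = (F.length : Int) * (F.length : Int) := by
    have : ∀ x ∈ F, (F.map (fun y =>
        (if pvPyLe y x then (0:Int) else 1) + (if pvPyLe x y then (0:Int) else 1)
          + (if y = x then (1:Int) else 0))).sum = (F.length : Int) := by
      intro x _
      calc (F.map (fun y =>
            (if pvPyLe y x then (0:Int) else 1) + (if pvPyLe x y then (0:Int) else 1)
              + (if y = x then (1:Int) else 0))).sum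
          = (F.map (fun _ => (1:Int))).sum := by
            apply congrArg List.sum
            apply List.map_congr_left
            intro y _; exact pv_tri x y
        _ = (F.length : Int) := by rw [PySem.List.sum_map_const_int]; ring
    rw [List.map_congr_left this, PySem.List.sum_map_const_int]
  have split1 : (F.map (fun x => (F.map (fun y =>
        (if pvPyLe y x then (0:Int) else 1) + (if pvPyLe x y then (0:Int) else 1)
          + (if y = x then (1:Int) else 0))).sum)).sum
      = (F.map (fun x => (F.map (fun y => if pvPyLe y x then (0:Int) else 1)).sum)).sum
        + (F.map (fun x => (F.map (fun y => if pvPyLe x y then (0:Int) else 1)).sum)).sum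
        + (F.map (fun x => (F.map (fun y => if y = x then (1:Int) else 0)).sum)).sum := by
    have h : ∀ x ∈ F, (F.map (fun y =>
        (if pvPyLe y x then (0:Int) else 1) + (if pvPyLe x y then (0:Int) else 1)
          + (if y = x then (1:Int) else 0))).sum
        = (F.map (fun y => if pvPyLe y x then (0:Int) else 1)).sum
          + (F.map (fun y => if pvPyLe x y then (0:Int) else 1)).sum
          + (F.map (fun y => if y = x then (1:Int) else 0)).sum := by
      intro x _
      rw [PySem.List.sum_map_add_int F (fun y =>
        (if pvPyLe y x then (0:Int) else 1) + (if pvPyLe x y then (0:Int) else 1))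
        (fun y => if y = x then (1:Int) else 0)]
      rw [PySem.List.sum_map_add_int F (fun y => if pvPyLe y x then (0:Int) else 1)
        (fun y => if pvPyLe x y then (0:Int) else 1)]
    rw [List.map_congr_left h]
    rw [PySem.List.sum_map_add_int F _ (fun x => (F.map (fun y => if y = x then (1:Int) else 0)).sum)]
    rw [PySem.List.sum_map_add_int F (fun x => (F.map (fun y => if pvPyLe y x then (0:Int) else 1)).sum)
      (fun x => (F.map (fun y => if pvPyLe x y then (0:Int) else 1)).sum)]
  have e1 : (F.map (fun x => (F.map (fun y => if pvPyLe y x then (0:Int) else 1)).sum)).sum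
      = (F.map (fun x => (F.countP (fun y => !pvPyLe y x) : Int))).sum := by
    apply congrArg List.sum
    apply List.map_congr_left
    intro x _; exact (hN x).symm
  have e3 : (F.map (fun x => (F.map (fun y => if y = x then (1:Int) else 0)).sum)).sum
      = (F.map (fun x => (F.count x : Int))).sum := by
    apply congrArg List.sum
    apply List.map_congr_left
    intro x _; exact (hE x).symm
  rw [← key, split1, e1, swap.symm.trans e1, e3]
  ring

-- the inner loop of A is a countP
theorem pv_inner (k1 k2 d : Int) (s1 : List Int) (sets2 : List (List Int)) (init : Int) :
    sets2.foldl (fun count s2 =>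
        if (k1 == k2) && pvPyLe s2 s1 then count
        else if !(s2.contains 0) || !(s2.contains d) then count
        else count + 1) init
      = init + (sets2.countP
          (fun s2 => !((k1 == k2) && pvPyLe s2 s1) && (s2.contains 0 && s2.contains d)) : Int) := by
  rw [PySem.List.foldl_congr_mem sets2 _ (fun count s2 =>
      if (!((k1 == k2) && pvPyLe s2 s1) && (s2.contains 0 && s2.contains d)) then count + 1 else count) init ?_]
  · exact PySem.List.foldl_if_add_one _ sets2 init
  · intro acc s2 _
    cases h1 : ((k1 == k2) && pvPyLe s2 s1) <;>
      cases h2 : s2.contains 0 <;> cases h3 : s2.contains d <;>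
        simp only [h1, h2, h3, Bool.not_true, Bool.not_false, Bool.and_true, Bool.and_false,
          Bool.true_and, Bool.false_and, Bool.or_true, Bool.or_false, Bool.true_or, Bool.false_or,
          Bool.false_eq_true, reduceIte] <;> simp

-- the whole double loop of A as a sum over the filtered list
theorem pv_countA (k1 k2 d : Int) (sets1 sets2 : List (List Int)) :
    sets1.foldl (fun count s1 =>
        if !(s1.contains 0) || !(s1.contains d) then count
        else sets2.foldl (fun count s2 =>
          if (k1 == k2) && pvPyLe s2 s1 then count
          else if !(s2.contains 0) || !(s2.contains d) then count
          else count + 1) count) (0:Int)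
      = ((sets1.filter (fun s => s.contains 0 && s.contains d)).map
          (fun s1 => (sets2.countP
            (fun s2 => !((k1 == k2) && pvPyLe s2 s1) && (s2.contains 0 && s2.contains d)) : Int))).sum := by
  rw [PySem.List.foldl_congr_mem sets1 _ (fun count s1 =>
      if (s1.contains 0 && s1.contains d)
      then count + (sets2.countP
          (fun s2 => !((k1 == k2) && pvPyLe s2 s1) && (s2.contains 0 && s2.contains d)) : Int)
      else count) 0 ?_]
  · rw [PySem.List.foldl_if_eq_foldl_filter, PySem.List.foldl_add]
    simp
  · intro acc s1 _
    cases h2 : s1.contains 0 <;> cases h3 : s1.contains d <;>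
      simp only [h2, h3, Bool.not_true, Bool.not_false, Bool.and_true, Bool.and_false,
        Bool.true_and, Bool.false_and, Bool.or_true, Bool.or_false, Bool.true_or, Bool.false_or,
        Bool.false_eq_true, reduceIte] <;>
      first
        | rfl
        | exact pv_inner k1 k2 d s1 sets2 acc

-- writing co_occ[d] = f d over range(1, p)
theorem pv_foldl_set_aux (f : Int -> Int) (b : Int) : ∀ (n : Nat) (a : Int), 1 <= a -> (b - a).toNat = n ->
    ∀ (co : List Int) (j : Nat),
    ((PySem.List.pyRange a b 1).foldl (fun co d => co.set d.toNat (f d)) co)[j]?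
      = if a <= (j:Int) ∧ (j:Int) < b ∧ j < co.length then some (f j) else co[j]? := by
  intro n
  induction n with
  | zero =>
    intro a ha hn co j
    rw [PySem.List.pyRange_one_eq_nil (by omega)]
    rw [List.foldl_nil, if_neg (by omega)]
  | succ n ih =>
    intro a ha hn co j
    have hab : a < b := by omega
    rw [PySem.List.pyRange_one_cons hab, List.foldl_cons]
    rw [ih (a + 1) (by omega) (by omega) (co.set a.toNat (f a)) j]
    rw [List.length_set, List.getElem?_set]
    by_cases h1 : a + 1 <= (j:Int) ∧ (j:Int) < b ∧ j < co.length
    · rw [if_pos h1, if_pos ⟨by omega, h1.2⟩]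
    · rw [if_neg h1]
      by_cases h2 : a.toNat = j
      · have hja : (j:Int) = a := by omega
        by_cases h3 : j < co.length
        · rw [if_pos h2, if_pos (by omega), if_pos ⟨by omega, by omega, h3⟩, hja]
        · rw [if_pos h2, if_neg (by omega), if_neg (by omega)]
          exact (List.getElem?_eq_none (by omega)).symm
      · rw [if_neg h2, if_neg (by omega)]

theorem pv_foldl_set (f : Int -> Int) (a b : Int) (ha : 1 <= a) (co : List Int) (j : Nat) :
    ((PySem.List.pyRange a b 1).foldl (fun co d => co.set d.toNat (f d)) co)[j]?
      = if a <= (j:Int) ∧ (j:Int) < b ∧ j < co.length then some (f j) else co[j]? :=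
  pv_foldl_set_aux f b (b - a).toNat a ha rfl co j

theorem pv_map_pyRange_getElem? (g : Int -> Int) (p : Int) (j : Nat) :
    ((PySem.List.pyRange 0 p 1).map g)[j]? = if (j:Int) < p then some (g j) else none := by
  rw [PySem.List.pyRange_one]
  simp only [List.map_map, List.getElem?_map, sub_zero]
  by_cases h : j < p.toNat
  · rw [List.getElem?_range h, if_pos (by omega)]
    simp
  · rw [List.getElem?_eq_none (by simpa using h), if_neg (by omega)]
    rfl

theorem pvAddAt_length (p c : Int) (a : List Int) (e : Int) : (pvAddAt p c a e).length = a.length := by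
  unfold pvAddAt; split <;> simp

theorem pv_addAt_fold_length (p c : Int) (l : List Int) (a : List Int) :
    (l.foldl (pvAddAt p c) a).length = a.length := by
  induction l generalizing a with
  | nil => rfl
  | cons e t ih => rw [List.foldl_cons, ih, pvAddAt_length]

theorem pv_addAt_fold_getD (p c : Int) (l : List Int) (hl : l.Nodup) (a : List Int) (j : Nat)
    (hj1 : 1 <= (j:Int)) (hj2 : (j:Int) < p) (hja : j < a.length) :
    (l.foldl (pvAddAt p c) a).getD j 0
      = a.getD j 0 + (if (j:Int) ∈ l then c else 0) := by
  induction l generalizing a with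
  | nil => simp
  | cons e t ih =>
    have hnd := List.nodup_cons.mp hl
    rw [List.foldl_cons, ih hnd.2 _ (by rw [pvAddAt_length]; exact hja)]
    by_cases he : e = (j:Int)
    · have hjt : (j:Int) ∉ t := he ▸ hnd.1
      have hset : (pvAddAt p c a e).getD j 0 = a.getD j 0 + c := by
        unfold pvAddAt
        rw [if_pos ⟨by omega, by omega⟩, show e.toNat = j by omega]
        simp [List.getD_eq_getElem?_getD, List.getElem?_set, hja]
      rw [hset, if_neg hjt, if_pos (by rw [← he]; exact List.mem_cons_self)]
      ring
    · have hset : (pvAddAt p c a e).getD j 0 = a.getD j 0 := by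
        unfold pvAddAt
        split
        · rw [List.getD_eq_getElem?_getD, List.getElem?_set, if_neg (by omega), ← List.getD_eq_getElem?_getD]
        · rfl
      rw [hset]
      have : ((j:Int) ∈ e :: t) ↔ ((j:Int) ∈ t) := by
        constructor
        · intro h'
          rcases List.mem_cons.mp h' with h'' | h''
          · exact absurd h''.symm he
          · exact h''
        · intro h'
          exact List.mem_cons_of_mem _ h' 
      by_cases hm : (j:Int) ∈ t
      · rw [if_pos hm, if_pos (this.mpr hm)]
      · rw [if_neg hm, if_neg (fun h' => hm (this.mp h'))]

theorem pv_incidence_getD (p : Int) (sets : List (List Int)) (j : Nat)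
    (hj1 : 1 <= (j:Int)) (hj2 : (j:Int) < p) :
    (pvIncidence p sets).getD j 0
      = (sets.countP (fun s => s.contains 0 && s.contains (j:Int)) : Int) := by
  unfold pvIncidence
  have main : ∀ (sets : List (List Int)) (a : List Int), j < a.length ->
      (sets.foldl (fun a s => if s.contains 0 then (PySem.Set.ofList s).foldl (pvAddAt p 1) a else a) a).getD j 0
        = a.getD j 0 + (sets.countP (fun s => s.contains 0 && s.contains (j:Int)) : Int) := by
    intro sets
    induction sets with
    | nil => intro a _; simp
    | cons s t ih =>
      intro a hja
      rw [List.foldl_cons, List.countP_cons]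
      by_cases h0 : s.contains 0 = true
      · rw [if_pos h0]
        rw [ih _ (by rw [pv_addAt_fold_length]; exact hja)]
        rw [pv_addAt_fold_getD p 1 (PySem.Set.ofList s) (PySem.Set.nodup_ofList s) a j hj1 hj2 hja]
        have hmem : ((j:Int) ∈ PySem.Set.ofList s) ↔ s.contains (j:Int) := by
          rw [PySem.Set.mem_ofList]; simp
        by_cases hcj : s.contains (j:Int) = true
        · rw [if_pos (hmem.mpr hcj)]
          simp only [h0, hcj, Bool.and_self, if_pos]
          push_cast
          ring
        · rw [if_neg (fun h' => hcj (hmem.mp h'))]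
          simp only [h0, Bool.true_and, hcj, Bool.and_false]
          push_cast
          ring
      · rw [if_neg h0]
        rw [ih _ hja]
        simp only [Bool.not_eq_true] at h0
        simp only [h0, Bool.false_and]
        push_cast
        ring
  rw [main sets (List.replicate p.toNat 0) (by simp; omega)]
  simp

theorem pv_sq_getD (p : Int) (items : List (List Int × Int)) (a : List Int) (j : Nat)
    (hj1 : 1 <= (j:Int)) (hj2 : (j:Int) < p) (hlen : a.length = p.toNat) :
    (items.foldl (fun sq tc => (PySem.Set.ofList tc.1).foldl (pvAddAt p (tc.2 * tc.2)) sq) a).getD j 0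
      = a.getD j 0 + ((items.filter (fun tc => tc.1.contains (j:Int))).map (fun tc => tc.2 * tc.2)).sum := by
  induction items generalizing a with
  | nil => simp
  | cons tc t ih =>
    have hja : j < a.length := by omega
    rw [List.foldl_cons, ih _ (by rw [pv_addAt_fold_length]; exact hlen)]
    rw [pv_addAt_fold_getD p (tc.2 * tc.2) (PySem.Set.ofList tc.1) (PySem.Set.nodup_ofList tc.1) a j hj1 hj2 hja]
    have hmem : ((j:Int) ∈ PySem.Set.ofList tc.1) ↔ tc.1.contains (j:Int) := by
      rw [PySem.Set.mem_ofList]; simp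
    rw [List.filter_cons]
    by_cases hcj : tc.1.contains (j:Int) = true
    · rw [if_pos (hmem.mpr hcj), if_pos hcj]
      rw [List.map_cons, List.sum_cons]
      ring
    · rw [if_neg (fun h' => hcj (hmem.mp h')), if_neg hcj]
      ring


-- the sq list of B groups the equal-pair count by distinct value
theorem pv_sq_value (sets1 : List (List Int)) (jv : Int) :
    (((PySem.Set.ofList (sets1.filter (fun s => s.contains 0))).filter (fun t => t.contains jv)).map
        (fun t => ((sets1.filter (fun s => s.contains 0)).count t : Int)
          * ((sets1.filter (fun s => s.contains 0)).count t : Int))).sum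
      = ((sets1.filter (fun s => s.contains 0 && s.contains jv)).map
          (fun x => ((sets1.filter (fun s => s.contains 0 && s.contains jv)).count x : Int))).sum := by
  have hGnd : ((PySem.Set.ofList (sets1.filter (fun s => s.contains 0))).filter
      (fun t => t.contains jv)).Nodup :=
    (PySem.Set.nodup_ofList (sets1.filter (fun s => s.contains 0))).filter _
  have hmem : ∀ t, t ∈ (PySem.Set.ofList (sets1.filter (fun s => s.contains 0))).filter
        (fun t => t.contains jv)
      ↔ t ∈ sets1.filter (fun s => s.contains 0 && s.contains jv) := by
    intro t
    rw [List.mem_filter, PySem.Set.mem_ofList, List.mem_filter, List.mem_filter]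
    constructor
    · rintro ⟨⟨ht, h0⟩, hj⟩
      exact ⟨ht, by rw [h0, hj]; rfl⟩
    · rintro ⟨ht, hq⟩
      have h01 : t.contains 0 = true ∧ t.contains jv = true := by simpa using hq
      exact ⟨⟨ht, h01.1⟩, h01.2⟩
  have hcount : ∀ t ∈ (PySem.Set.ofList (sets1.filter (fun s => s.contains 0))).filter
        (fun t => t.contains jv),
      ((sets1.filter (fun s => s.contains 0)).count t : Int)
          * ((sets1.filter (fun s => s.contains 0)).count t : Int)
        = ((sets1.filter (fun s => s.contains 0 && s.contains jv)).count t : Int)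
          * ((sets1.filter (fun s => s.contains 0 && s.contains jv)).count t : Int) := by
    intro t htG
    have htj : t.contains jv = true := (List.mem_filter.mp htG).2
    have hc : (sets1.filter (fun s => s.contains 0)).count t
        = (sets1.filter (fun s => s.contains 0 && s.contains jv)).count t := by
      rw [List.count_eq_countP, List.count_eq_countP, List.countP_filter, List.countP_filter]
      apply List.countP_congr
      intro x _
      by_cases hx : x = t
      · subst hx
        simp only [beq_self_eq_true, Bool.true_and]
        rw [htj, Bool.and_true]
      · simp [hx]
    rw [hc]
  rw [List.map_congr_left hcount]
  exact pv_grouped _ _ hGnd hmem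

-- the two ports agree on every input
theorem pv_main (by_k : List (Int × List (List Int))) (k1 k2 p : Int) :
    cross_co_occurrence by_k k1 k2 p = cross_co_occurrence_alt by_k k1 k2 p := by
  simp only [cross_co_occurrence, cross_co_occurrence_alt]
  by_cases hk : k1 = k2
  · subst hk
    rw [if_neg (by simp)]
    apply List.ext_getElem?
    intro j
    rw [pv_foldl_set _ 1 p (le_refl 1), pv_map_pyRange_getElem?, List.length_replicate]
    simp only [Int.toNat_natCast]
    by_cases hj : (j:Int) < p
    · by_cases hj0 : j = 0
      · subst hj0
        rw [if_neg (by omega), if_pos hj]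
        have h0 : (0:Nat) < p.toNat := by omega
        simp [List.getElem?_replicate, h0]
      · have hj1 : 1 <= (j:Int) := by omega
        rw [if_pos ⟨hj1, hj, by omega⟩, if_pos hj, if_neg (by omega)]
        congr 1
        -- abbreviations
        have hA := pv_countA k1 k1 (j:Int) ((PySem.Dict.mk by_k).getD k1 []) ((PySem.Dict.mk by_k).getD k1 [])
        rw [hA]
        -- LHS sum as N
        have hLHS : (((PySem.Dict.mk by_k).getD k1 []).filter
              (fun s => s.contains 0 && s.contains (j:Int))).map
              (fun s1 => (((PySem.Dict.mk by_k).getD k1 []).countP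
                (fun s2 => !((k1 == k1) && pvPyLe s2 s1)
                  && (s2.contains 0 && s2.contains (j:Int))) : Int))
            = (((PySem.Dict.mk by_k).getD k1 []).filter
              (fun s => s.contains 0 && s.contains (j:Int))).map
              (fun x => ((((PySem.Dict.mk by_k).getD k1 []).filter
                (fun s => s.contains 0 && s.contains (j:Int))).countP
                  (fun y => !pvPyLe y x) : Int)) := by
          apply List.map_congr_left
          intro x _
          rw [List.countP_filter]
          congr 1
          apply List.countP_congr
          intro s2 _
          simp
        rw [hLHS]
        -- RHS pieces
        rw [pv_incidence_getD p _ j hj1 hj]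
        rw [PySem.List.foldl_if_eq_foldl_filter (fun s : List Int => s.contains 0)
          (fun (cnt : PySem.Dict (List Int) Int) (s : List Int) => cnt.modify s 0 (· + 1))
          ((PySem.Dict.mk by_k).getD k1 []) PySem.Dict.empty,
          ← PySem.Dict.counter_eq_foldl, PySem.Dict.items_counter]
        rw [pv_sq_getD p _ _ j hj1 hj (by simp)]
        rw [List.filter_map, List.map_map]
        have hcomp : (((PySem.Set.ofList (((PySem.Dict.mk by_k).getD k1 []).filter
              (fun s => s.contains 0))).filter
              ((fun tc => tc.1.contains (j:Int)) ∘ (fun k =>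
                (k, ((((PySem.Dict.mk by_k).getD k1 []).filter (fun s => s.contains 0)).count k : Int))))).map
              ((fun tc => tc.2 * tc.2) ∘ (fun k =>
                (k, ((((PySem.Dict.mk by_k).getD k1 []).filter (fun s => s.contains 0)).count k : Int))))).sum
            = (((PySem.Set.ofList (((PySem.Dict.mk by_k).getD k1 []).filter
              (fun s => s.contains 0))).filter (fun t => t.contains (j:Int))).map
              (fun t => ((((PySem.Dict.mk by_k).getD k1 []).filter (fun s => s.contains 0)).count t : Int)
                * ((((PySem.Dict.mk by_k).getD k1 []).filter (fun s => s.contains 0)).count t : Int))).sum := rfl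
        rw [hcomp, pv_sq_value _ (j:Int)]
        have hrep : (List.replicate p.toNat (0:Int)).getD j 0 = 0 := by
          rw [List.getD_eq_getElem?_getD, List.getElem?_replicate, if_pos (by omega)]
          rfl
        rw [hrep]
        have hp := pv_pair (((PySem.Dict.mk by_k).getD k1 []).filter
          (fun s => s.contains 0 && s.contains (j:Int)))
        simp only [List.countP_eq_length_filter] at hp ⊢
        set N := ((((PySem.Dict.mk by_k).getD k1 []).filter
            (fun s => s.contains 0 && s.contains (j:Int))).map
            (fun x => (((((PySem.Dict.mk by_k).getD k1 []).filter
              (fun s => s.contains 0 && s.contains (j:Int))).filter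
                (fun y => !pvPyLe y x)).length : Int))).sum with hN
        set E := ((((PySem.Dict.mk by_k).getD k1 []).filter
            (fun s => s.contains 0 && s.contains (j:Int))).map
            (fun x => ((((PySem.Dict.mk by_k).getD k1 []).filter
              (fun s => s.contains 0 && s.contains (j:Int))).count x : Int))).sum with hE
        rw [show (((((PySem.Dict.mk by_k).getD k1 []).filter
            (fun s => s.contains 0 && s.contains (j:Int))).length : Int)
            * ((((PySem.Dict.mk by_k).getD k1 []).filter
              (fun s => s.contains 0 && s.contains (j:Int))).length : Int) - (0 + E)) = 2 * N from by
          linarith [hp]]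
        rw [PySem.Int.floordiv_eq_ediv_of_pos (by norm_num)]
        omega
    · rw [if_neg (by omega), if_neg hj]
      have hnone : (List.replicate p.toNat (0:Int))[j]? = none :=
        List.getElem?_eq_none (by rw [List.length_replicate]; omega)
      exact hnone
  · rw [if_pos hk]
    apply List.ext_getElem?
    intro j
    rw [pv_foldl_set _ 1 p (le_refl 1), pv_map_pyRange_getElem?, List.length_replicate]
    simp only [Int.toNat_natCast]
    by_cases hj : (j:Int) < p
    · by_cases hj0 : j = 0
      · subst hj0
        rw [if_neg (by omega), if_pos hj]
        have h0 : (0:Nat) < p.toNat := by omega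
        simp [List.getElem?_replicate, h0]
      · have hj1 : 1 <= (j:Int) := by omega
        rw [if_pos ⟨hj1, hj, by omega⟩, if_pos hj, if_neg (by omega)]
        congr 1
        rw [pv_countA k1 k2 (j:Int) ((PySem.Dict.mk by_k).getD k1 []) ((PySem.Dict.mk by_k).getD k2 [])]
        have hkb : (k1 == k2) = false := by simp [hk]
        have hconst : (((PySem.Dict.mk by_k).getD k1 []).filter
              (fun s => s.contains 0 && s.contains (j:Int))).map
              (fun s1 => ((((PySem.Dict.mk by_k).getD k2 [])).countP
                (fun s2 => !((k1 == k2) && pvPyLe s2 s1)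
                  && (s2.contains 0 && s2.contains (j:Int))) : Int))
            = (((PySem.Dict.mk by_k).getD k1 []).filter
              (fun s => s.contains 0 && s.contains (j:Int))).map
              (fun _ => ((((PySem.Dict.mk by_k).getD k2 [])).countP
                (fun s2 => s2.contains 0 && s2.contains (j:Int)) : Int)) := by
          apply List.map_congr_left
          intro x _
          congr 1
          apply List.countP_congr
          intro s2 _
          rw [hkb]
          rfl
        rw [hconst, PySem.List.sum_map_const_int]
        rw [pv_incidence_getD p _ j hj1 hj, pv_incidence_getD p _ j hj1 hj]
        simp only [List.countP_eq_length_filter]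
    · rw [if_neg (by omega), if_neg hj]
      have hnone : (List.replicate p.toNat (0:Int))[j]? = none :=
        List.getElem?_eq_none (by rw [List.length_replicate]; omega)
      exact hnone


-- ===== VERDICT (by name: the statement is the Claim_ definition above) =====
theorem cross_co_occurrence_spec : Claim_equal_cross_co_occurrence := by
  intro by_k k1 k2 p _
  exact pv_main by_k k1 k2 p
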